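-- pv_equiv track=rewrite | github.com/mrjohnsonloomis/cl_cs | 3 my_code/exercises/2_1_solutions.py | update_high_scores
-- ===== SOURCE A (Python) =====
-- def update_high_scores(scores, new_score):
--     # Create a new list to store updated scores
--     new_scores = []
--
--     # Keep track of whether we've added the new score
--     added_new_score = False
--
--     # Go through each score in the current list
--     for score in scores:
--         # If we haven't added the new score yet and it's higher than
--         # the current score, add it first
--         if not added_new_score and new_score > score:
--             new_scores.append(new_score)
--             added_new_score = True
--
--         # Add the current score from the original list
--         new_scores.append(score)
--
--     # If we haven't added the new score yet and there's room in the list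
--     # (less than 5 scores), add it at the end
--     if not added_new_score and len(new_scores) < 5:
--         new_scores.append(new_score)
--
--     # Keep only the top 5 scores
--     return new_scores[:5]
-- ===== SOURCE B (Python) =====
-- def update_high_scores(scores, new_score):
--     # Output is capped at 5, so examine at most the first 5 scores and never
--     # build the full list: copy scores that stay ahead of new_score until the
--     # cap is hit, the split point is found, or the list ends; then place
--     # new_score (if there is room) and top up from the untouched tail slice.
--     out = []
--     i = 0
--     n = len(scores)
--     while len(out) < 5 and i < n:
--         if new_score > scores[i]:
--             break
--         out.append(scores[i])
--         i += 1
--     if len(out) < 5: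
--         out.append(new_score)
--     out.extend(scores[i:i + (5 - len(out))])
--     return out
-- ===== Notes on version B (the rewrite author's own statement) =====
-- stated objective: alternative
-- what changed: B never rebuilds the whole list: it inspects at most the first 5 scores with an early-exit bounded scan, places new_score if there is room, and tops up from the untouched tail slice, instead of A's flag-guarded full rebuild-and-truncate.
import Mathlib
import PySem

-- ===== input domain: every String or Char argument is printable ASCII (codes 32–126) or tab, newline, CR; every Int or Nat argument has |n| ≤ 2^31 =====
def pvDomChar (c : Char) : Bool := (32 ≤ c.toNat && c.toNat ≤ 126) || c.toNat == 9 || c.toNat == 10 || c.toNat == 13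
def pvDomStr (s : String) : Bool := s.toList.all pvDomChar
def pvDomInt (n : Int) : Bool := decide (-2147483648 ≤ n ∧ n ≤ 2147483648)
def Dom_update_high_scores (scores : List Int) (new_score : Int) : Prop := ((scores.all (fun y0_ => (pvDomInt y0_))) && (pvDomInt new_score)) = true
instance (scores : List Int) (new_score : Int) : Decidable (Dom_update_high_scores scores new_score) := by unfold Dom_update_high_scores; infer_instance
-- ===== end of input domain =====

-- B does a bounded early-exit scan of at most the first 5 scores instead of A's full rebuild of the list (objective: alternative).

-- ===== PORT A =====
-- the for-loop of A with its two pieces of state: the accumulated new_scores list and the added_new_score flag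
def uhsLoopA (scores : List Int) (new_score : Int) (new_scores : List Int) (added : Bool) :
    List Int × Bool :=
  match scores with
  | [] => (new_scores, added)
  | score :: rest =>
      if !added && new_score > score then
        uhsLoopA rest new_score (new_scores ++ [new_score, score]) true
      else
        uhsLoopA rest new_score (new_scores ++ [score]) added

def update_high_scores (scores : List Int) (new_score : Int) : List Int :=
  let r := uhsLoopA scores new_score [] false
  let new_scores := if !r.2 && r.1.length < 5 then r.1 ++ [new_score] else r.1
  new_scores.take 5  -- new_scores[:5] with a nonnegative bound = take 5

-- ===== PORT B =====
-- 'while len(out) < 5 and i < n: …' — the loop walks the list (i < n becomes the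
-- structural recursion on the remaining scores), stops at the cap or at the break.
def uhsLoopB (rest : List Int) (new_score : Int) (out : List Int) (i : Nat) : List Int × Nat :=
  match rest with
  | [] => (out, i)
  | s :: rs =>
      if out.length < 5 then
        if new_score > s then (out, i)                       -- break
        else uhsLoopB rs new_score (out ++ [s]) (i + 1)
      else (out, i)

def update_high_scores_alt (scores : List Int) (new_score : Int) : List Int :=
  let r := uhsLoopB scores new_score [] 0
  let out := if r.1.length < 5 then r.1 ++ [new_score] else r.1
  -- out.extend(scores[i:i + (5 - len(out))]) : slice with nonnegative bounds
  out ++ ((scores.drop r.2).take (5 - out.length))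

-- ===== PRECONDITION & SPEC =====
def Spec_update_high_scores (scores : List Int) (new_score : Int) (out : List Int) : Prop := out = update_high_scores_alt scores new_score
instance (scores : List Int) (new_score : Int) (out : List Int) : Decidable (Spec_update_high_scores scores new_score out) := by unfold Spec_update_high_scores; infer_instance

-- ===== CLAIM (what is proved, stated in full; the proofs are below) =====
def Claim_equal_update_high_scores : Prop := ∀ (scores : List Int) (new_score : Int), Dom_update_high_scores scores new_score → Spec_update_high_scores scores new_score (update_high_scores scores new_score)

-- ===== LEMMAS AND PROOFS =====
-- index of the first score strictly below new_score
def uhsFindIdx (scores : List Int) (new_score : Int) : Option Nat :=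
  match scores with
  | [] => none
  | s :: rest => if new_score > s then some 0 else (uhsFindIdx rest new_score).map (· + 1)

-- that index, or the length when there is none
def uhsJd (scores : List Int) (new_score : Int) : Nat :=
  match uhsFindIdx scores new_score with
  | some j => j
  | none => scores.length

theorem uhsFindIdx_lt_length (scores : List Int) (new_score : Int) (j : Nat)
    (h : uhsFindIdx scores new_score = some j) : j < scores.length := by
  induction scores generalizing j with
  | nil => simp [uhsFindIdx] at h
  | cons s rest ih =>
    simp only [uhsFindIdx] at h
    split at h
    · obtain rfl : j = 0 := (Option.some_inj.mp h).symm
      simp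
    · cases hf : uhsFindIdx rest new_score with
      | none => simp [hf] at h
      | some k =>
        simp [hf] at h
        have := ih k hf
        simp [← h]; omega

theorem uhsLoopA_true (scores : List Int) (new_score : Int) (acc : List Int) :
    uhsLoopA scores new_score acc true = (acc ++ scores, true) := by
  induction scores generalizing acc with
  | nil => simp [uhsLoopA]
  | cons s rest ih => simp [uhsLoopA, ih]

theorem uhsLoopA_false (scores : List Int) (new_score : Int) (acc : List Int) :
    uhsLoopA scores new_score acc false =
      match uhsFindIdx scores new_score with
      | some i => (acc ++ scores.take i ++ [new_score] ++ scores.drop i, true)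
      | none => (acc ++ scores, false) := by
  induction scores generalizing acc with
  | nil => simp [uhsLoopA, uhsFindIdx]
  | cons s rest ih =>
    by_cases h : new_score > s
    · simp [uhsLoopA, uhsFindIdx, h, uhsLoopA_true]
    · simp only [uhsLoopA, uhsFindIdx, h, decide_false, Bool.not_false, Bool.true_and,
        if_false]
      rw [ih]
      cases hf : uhsFindIdx rest new_score with
      | none => simp
      | some i => simp

theorem uhsLoopB_eq (rest : List Int) (new_score : Int) (out : List Int) (i : Nat) :
    uhsLoopB rest new_score out i =
      (out ++ rest.take (min (uhsJd rest new_score) (5 - out.length)),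
       i + min (uhsJd rest new_score) (5 - out.length)) := by
  induction rest generalizing out i with
  | nil => simp [uhsLoopB, uhsJd, uhsFindIdx]
  | cons s rs ih =>
    by_cases hlen : out.length < 5
    · by_cases h : new_score > s
      · simp [uhsLoopB, hlen, h, uhsJd, uhsFindIdx]
      · simp only [uhsLoopB, hlen, if_true, h, if_false]
        rw [ih]
        have hjd : uhsJd (s :: rs) new_score = uhsJd rs new_score + 1 := by
          simp only [uhsJd, uhsFindIdx, h]
          cases uhsFindIdx rs new_score <;> simp
        have hmin : min (uhsJd (s :: rs) new_score) (5 - out.length)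
            = min (uhsJd rs new_score) (5 - (out ++ [s]).length) + 1 := by
          simp [hjd, List.length_append]; omega
        rw [hmin]
        simp [List.take_succ_cons]
        omega
    · have h0 : 5 - out.length = 0 := by omega
      simp [uhsLoopB, hlen, h0]

-- ===== VERDICT (by name: the statement is the Claim_ definition above) =====
theorem update_high_scores_spec : Claim_equal_update_high_scores := by
  intro scores new_score _
  unfold Spec_update_high_scores update_high_scores update_high_scores_alt
  rw [uhsLoopA_false, uhsLoopB_eq]
  cases hf : uhsFindIdx scores new_score with
  | some idx =>
    have hlt : idx < scores.length := uhsFindIdx_lt_length _ _ _ hf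
    simp only [uhsJd, hf, Nat.sub_zero, List.nil_append, List.length_nil]
    by_cases h5 : idx < 5
    · have hmin : min idx 5 = idx := by omega
      have hlt' : (scores.take idx).length = idx := by
        simp [List.length_take]; omega
      simp [hmin, hlt', List.take_append, h5]
      rw [List.take_take]
      have hm2 : min 5 idx = idx := by omega
      rw [hm2]
      obtain ⟨k, hk⟩ : ∃ k, 5 - idx = k + 1 := ⟨4 - idx, by omega⟩
      rw [hk, List.take_succ_cons]
      have : k = 5 - (idx + 1) := by omega
      subst this
      simp
    · have hmin : min idx 5 = 5 := by omega
      have hlen5 : (scores.take 5).length = 5 := by simp [List.length_take]; omega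
      simp [hmin, hlen5, List.take_append, List.take_take]
      have h1 : min 5 idx = 5 := by omega
      have h2 : min idx scores.length = idx := by omega
      simp [h1, h2, Nat.sub_eq_zero_of_le (by omega : 5 ≤ idx)]
  | none =>
    simp only [uhsJd, hf, Nat.sub_zero, List.nil_append, List.length_nil]
    by_cases hn : scores.length < 5
    · have hmin : min scores.length 5 = scores.length := by omega
      simp [hmin, hn]
    · have hmin : min scores.length 5 = 5 := by omega
      have hlen5 : (scores.take 5).length = 5 := by simp [List.length_take]; omega
      simp [hmin, hlen5, hn]
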